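-- pv_equiv track=rewrite | github.com/pypi-data/pypi-mirror-346 | packages/appium-python-client-shadowstep/appium_python_client_shadowstep-0.23.51-py3-none-any.whl/shadowstep/page_object/page_object_generator.py | _select_title_element
-- ===== SOURCE A (Python) =====
-- from typing import (
--     List, Dict, Union,
--     Set, Tuple, Optional
-- )
--
-- def _select_title_element(
--
--     elems: List[Dict[str, str]]
-- ) -> Dict[str, str]:
--     for key in ('text', 'content-desc'):
--         found = next((e for e in elems if e.get(key)), None)
--         if found:
--             return found
--     return elems[0] if elems else {}
-- ===== SOURCE B (Python) =====
-- def _select_title_element(elems):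
--     first_text = None
--     first_cd = None
--     for e in elems:
--         if first_text is None and e.get('text'):
--             first_text = e
--         if first_cd is None and e.get('content-desc'):
--             first_cd = e
--     if first_text is not None:
--         return first_text
--     if first_cd is not None:
--         return first_cd
--     return elems[0] if elems else {}
-- ===== Notes on version B (the rewrite author's own statement) =====
-- stated objective: alternative
-- what changed: Replaces A's two sequential scans (one per key) by a single pass that tracks the first element with truthy 'text' and the first with truthy 'content-desc' simultaneously, choosing text over content-desc afterwards.
import Mathlib
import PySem

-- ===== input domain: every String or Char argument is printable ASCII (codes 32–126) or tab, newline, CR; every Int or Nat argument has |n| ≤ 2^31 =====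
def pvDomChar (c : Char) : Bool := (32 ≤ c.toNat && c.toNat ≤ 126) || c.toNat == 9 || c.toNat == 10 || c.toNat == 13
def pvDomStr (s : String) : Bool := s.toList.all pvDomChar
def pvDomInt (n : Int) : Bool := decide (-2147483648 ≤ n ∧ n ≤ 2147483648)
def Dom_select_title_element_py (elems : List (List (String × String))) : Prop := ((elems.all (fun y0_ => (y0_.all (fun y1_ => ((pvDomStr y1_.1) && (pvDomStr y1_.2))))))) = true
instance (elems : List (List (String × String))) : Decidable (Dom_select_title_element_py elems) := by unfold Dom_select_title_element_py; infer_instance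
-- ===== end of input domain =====

-- B replaces A's two sequential scans (one per key) with a single pass tracking both first-match candidates; alternative decomposition, same cost.


-- ===== PORT A =====
-- A scans once per key in ('text','content-desc'), returning the first element
-- whose value for that key is truthy (dict elements found are non-empty, hence truthy).
def pvT (e : List (String × String)) : Bool := PySem.Dict.getD ⟨e⟩ "text" "" != ""
def pvC (e : List (String × String)) : Bool := PySem.Dict.getD ⟨e⟩ "content-desc" "" != ""

def select_title_element_py (elems : List (List (String × String))) : List (String × String) :=
  match elems.find? pvT with
  | some found => found
  | none =>
    match elems.find? pvC with
    | some found => found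
    | none => match elems with | [] => [] | e :: _ => e

-- ===== PORT B =====
-- B: one pass tracking the first truthy-'text' and first truthy-'content-desc' elements.
def pvStep (st : Option (List (String × String)) × Option (List (String × String)))
    (e : List (String × String)) :
    Option (List (String × String)) × Option (List (String × String)) :=
  ((if st.1 = none ∧ pvT e then some e else st.1),
   (if st.2 = none ∧ pvC e then some e else st.2))

def select_title_element_py_alt (elems : List (List (String × String))) : List (String × String) :=
  match elems.foldl pvStep (none, none) with
  | (some e, _) => e
  | (none, some e) => e
  | (none, none) => elems.headD []

-- ===== PRECONDITION & SPEC =====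
def Spec_select_title_element_py (elems : List (List (String × String))) (out : List (String × String)) : Prop := out = select_title_element_py_alt elems
instance (elems : List (List (String × String))) (out : List (String × String)) : Decidable (Spec_select_title_element_py elems out) := by unfold Spec_select_title_element_py; infer_instance

-- ===== CLAIM (what is proved, stated in full; the proofs are below) =====
def Claim_equal_select_title_element_py : Prop := ∀ (elems : List (List (String × String))), Dom_select_title_element_py elems → Spec_select_title_element_py elems (select_title_element_py elems)

-- ===== LEMMAS AND PROOFS =====

-- ===== VERDICT (by name: the statement is the Claim_ definition above) =====
lemma pvStep_fold_fst : ∀ (xs : List (List (String × String))) (t c : Option (List (String × String))),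
    (xs.foldl pvStep (t, c)).1 = (match t with | some a => some a | none => xs.find? pvT) := by
  intro xs
  induction xs with
  | nil => intro t c; cases t <;> simp
  | cons e xs ih =>
    intro t c
    cases t with
    | some a => simp [pvStep, ih]
    | none =>
      by_cases h : pvT e = true <;> simp [pvStep, h, ih, List.find?]

lemma pvStep_fold_snd : ∀ (xs : List (List (String × String))) (t c : Option (List (String × String))),
    (xs.foldl pvStep (t, c)).2 = (match c with | some a => some a | none => xs.find? pvC) := by
  intro xs
  induction xs with
  | nil => intro t c; cases c <;> simp
  | cons e xs ih =>
    intro t c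
    cases c with
    | some a => simp [pvStep, ih]
    | none =>
      by_cases h : pvC e = true <;> simp [pvStep, h, ih, List.find?]

theorem select_title_element_py_spec : Claim_equal_select_title_element_py := by
  intro elems _
  show select_title_element_py elems = select_title_element_py_alt elems
  unfold select_title_element_py select_title_element_py_alt
  have hp : elems.foldl pvStep (none, none) = (elems.find? pvT, elems.find? pvC) := by
    have h1 := pvStep_fold_fst elems none none
    have h2 := pvStep_fold_snd elems none none
    exact Prod.ext (by simpa using h1) (by simpa using h2)
  rw [hp]
  cases h1 : elems.find? pvT <;> cases h2 : elems.find? pvC <;> cases elems <;> simp [List.headD]
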